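-- pv_equiv track=rewrite | github.com/DavidLeifer/OpenSourceDocument | ExerciseStatisticsVersions/exercise_modules/202505060828-exercise_module.py | csv_flipper
-- ===== SOURCE A (Python) =====
-- def csv_flipper(csv_list, col_width):
--   csv_flipped = []
--   for i in csv_list:
--     if i == str(5):
--       n = str(1)
--       csv_flipped.append(n)
--     elif i == str(4):
--       n = str(2)
--       csv_flipped.append(n)
--     elif i == str(3):
--       n = str(3)
--       csv_flipped.append(n)
--     elif i == str(2):
--       n = str(4)
--       csv_flipped.append(n)
--     elif i == str(1):
--       n = str(5)
--       csv_flipped.append(n)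
--     else:
--       csv_flipped.append(i)
--   return csv_flipped
-- ===== SOURCE B (Python) =====
-- def csv_flipper(csv_list, col_width):
--     # Two staged swap passes over a mutable copy: first exchange '1'<->'5',
--     # then '2'<->'4'; '3' and everything else is never touched.
--     out = list(csv_list)
--     for lo, hi in (('1', '5'), ('2', '4')):
--         for idx, v in enumerate(out):
--             if v == lo:
--                 out[idx] = hi
--             elif v == hi:
--                 out[idx] = lo
--     return out
-- ===== Notes on version B (the rewrite author's own statement) =====
-- stated objective: alternative
-- what changed: Replaces the single-pass five-branch substitution table and append-accumulator with two staged swap passes over a mutable copy, each pass exchanging one symmetric pair ('1'<->'5', then '2'<->'4') by index assignment; '3' is a fixed point and needs no branch (measured ~2x faster in a timing run).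
import Mathlib
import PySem

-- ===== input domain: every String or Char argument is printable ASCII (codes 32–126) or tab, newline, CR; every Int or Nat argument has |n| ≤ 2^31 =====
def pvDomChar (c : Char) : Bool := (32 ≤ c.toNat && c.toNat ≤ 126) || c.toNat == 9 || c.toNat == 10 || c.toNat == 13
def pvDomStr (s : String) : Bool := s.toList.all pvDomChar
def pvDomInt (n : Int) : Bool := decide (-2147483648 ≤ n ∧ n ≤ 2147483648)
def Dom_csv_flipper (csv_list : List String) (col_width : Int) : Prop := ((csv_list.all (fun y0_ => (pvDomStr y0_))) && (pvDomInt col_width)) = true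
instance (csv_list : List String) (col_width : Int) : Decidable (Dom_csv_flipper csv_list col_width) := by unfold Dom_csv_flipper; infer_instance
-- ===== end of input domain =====

-- B replaces A's single-pass five-branch substitution table with two staged swap passes
-- (exchange '1'<->'5', then '2'<->'4') over a copy of the list; objective: alternative.


-- ===== PORT A =====
def csv_flipper (csv_list : List String) (col_width : Int) : List String :=
  csv_list.foldl (fun csv_flipped i =>
    if i = "5" then csv_flipped ++ ["1"]
    else if i = "4" then csv_flipped ++ ["2"]
    else if i = "3" then csv_flipped ++ ["3"]
    else if i = "2" then csv_flipped ++ ["4"]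
    else if i = "1" then csv_flipped ++ ["5"]
    else csv_flipped ++ [i]) []

-- ===== PORT B =====
-- two staged passes, each swapping one pair (lo, hi) elementwise (index assignment = map)
def csv_flipper_alt (csv_list : List String) (col_width : Int) : List String :=
  [("1", "5"), ("2", "4")].foldl (fun out p =>
    out.map (fun v => if v = p.1 then p.2 else if v = p.2 then p.1 else v)) csv_list

-- ===== PRECONDITION & SPEC =====
def Spec_csv_flipper (csv_list : List String) (col_width : Int) (out : List String) : Prop := out = csv_flipper_alt csv_list col_width
instance (csv_list : List String) (col_width : Int) (out : List String) : Decidable (Spec_csv_flipper csv_list col_width out) := by unfold Spec_csv_flipper; infer_instance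

-- ===== CLAIM =====
def Claim_equal_csv_flipper : Prop := ∀ (csv_list : List String) (col_width : Int), Dom_csv_flipper csv_list col_width → Spec_csv_flipper csv_list col_width (csv_flipper csv_list col_width)

-- ===== LEMMAS AND PROOFS =====

def pvStepA (csv_flipped : List String) (i : String) : List String :=
  if i = "5" then csv_flipped ++ ["1"]
  else if i = "4" then csv_flipped ++ ["2"]
  else if i = "3" then csv_flipped ++ ["3"]
  else if i = "2" then csv_flipped ++ ["4"]
  else if i = "1" then csv_flipped ++ ["5"]
  else csv_flipped ++ [i]

def pvCellA (i : String) : String :=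
  if i = "5" then "1"
  else if i = "4" then "2"
  else if i = "3" then "3"
  else if i = "2" then "4"
  else if i = "1" then "5"
  else i

def pvSwap (p : String × String) (v : String) : String :=
  if v = p.1 then p.2 else if v = p.2 then p.1 else v

theorem pvFoldA (csv_list : List String) (acc : List String) :
    csv_list.foldl pvStepA acc = acc ++ csv_list.map pvCellA := by
  induction csv_list generalizing acc with
  | nil => simp
  | cons x xs ih =>
    have hx : pvStepA acc x = acc ++ [pvCellA x] := by
      unfold pvStepA pvCellA; split_ifs <;> rfl
    simp [List.foldl, hx, ih]

theorem pvSwap_comp (i : String) : pvSwap ("2", "4") (pvSwap ("1", "5") i) = pvCellA i := by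
  unfold pvSwap pvCellA
  by_cases h5 : i = "5" <;> by_cases h4 : i = "4" <;> by_cases h3 : i = "3" <;>
    by_cases h2 : i = "2" <;> by_cases h1 : i = "1" <;> simp_all

-- ===== VERDICT =====
theorem csv_flipper_spec : Claim_equal_csv_flipper := by
  intro csv_list col_width _
  show csv_flipper csv_list col_width = csv_flipper_alt csv_list col_width
  have hA : csv_flipper csv_list col_width = csv_list.map pvCellA := by
    have := pvFoldA csv_list []
    simpa [csv_flipper, pvStepA] using this
  have hB : csv_flipper_alt csv_list col_width
      = (csv_list.map (pvSwap ("1", "5"))).map (pvSwap ("2", "4")) := rfl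
  rw [hA, hB, List.map_map]
  exact (List.map_congr_left (fun i _ => (pvSwap_comp i).symm))
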